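-- pv_equiv track=rewrite | github.com/test-ai-1/RL_ENV | scripts/run_baseline.py | _diagnose_failures
-- ===== SOURCE A (Python) =====
-- def _diagnose_failures(intermediate_results: list[dict]) -> list[str]:
--     """Classify common failure causes from step records."""
--     reasons: list[str] = []
--     saw_incorrect_column = False
--     saw_wrong_operation = False
--     saw_bad_filtering = False
--
--     for step in intermediate_results:
--         op = str(step.get("operation") or "")
--         err = str(step.get("error") or "")
--
--         if err in {"column_missing", "empty_column", "column_not_numeric", "missing_column"}:
--             saw_incorrect_column = True
--
--         if err.startswith("expected_") or err == "unknown_operation":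
--             saw_wrong_operation = True
--
--         if op == "filter" and (
--             err in {"filter_requires_value", "filter_empty_value"}
--             or step.get("penalty_kind") == "useless"
--         ):
--             saw_bad_filtering = True
--
--     if saw_incorrect_column:
--         reasons.append("incorrect column")
--     if saw_wrong_operation:
--         reasons.append("wrong operation")
--     if saw_bad_filtering:
--         reasons.append("bad filtering")
--     if not reasons:
--         reasons.append("no clear failure category detected")
--     return reasons
-- ===== SOURCE B (Python) =====
-- _COL_ERRS = {"column_missing", "empty_column", "column_not_numeric", "missing_column"}
-- _FILTER_ERRS = {"filter_requires_value", "filter_empty_value"}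
--
--
-- def _err(step):
--     return str(step.get("error") or "")
--
--
-- def _is_wrong_operation(step):
--     err = _err(step)
--     return err.startswith("expected_") or err == "unknown_operation"
--
--
-- def _is_bad_filtering(step):
--     return str(step.get("operation") or "") == "filter" and (
--         _err(step) in _FILTER_ERRS or step.get("penalty_kind") == "useless"
--     )
--
--
-- def _diagnose_failures(intermediate_results: list[dict]) -> list[str]:
--     """Classify common failure causes from step records."""
--     flags = [
--         (any(_err(s) in _COL_ERRS for s in intermediate_results), "incorrect column"),
--         (any(_is_wrong_operation(s) for s in intermediate_results), "wrong operation"),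
--         (any(_is_bad_filtering(s) for s in intermediate_results), "bad filtering"),
--     ]
--     reasons = [label for flag, label in flags if flag]
--     return reasons or ["no clear failure category detected"]
-- ===== Notes on version B (the rewrite author's own statement) =====
-- stated objective: simpler
-- what changed: Replaces the single fused accumulator loop carrying three mutable flags with three independent any() scans (one per failure category) and a declarative flag/label table instead of the append-if chain.
import Mathlib
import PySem

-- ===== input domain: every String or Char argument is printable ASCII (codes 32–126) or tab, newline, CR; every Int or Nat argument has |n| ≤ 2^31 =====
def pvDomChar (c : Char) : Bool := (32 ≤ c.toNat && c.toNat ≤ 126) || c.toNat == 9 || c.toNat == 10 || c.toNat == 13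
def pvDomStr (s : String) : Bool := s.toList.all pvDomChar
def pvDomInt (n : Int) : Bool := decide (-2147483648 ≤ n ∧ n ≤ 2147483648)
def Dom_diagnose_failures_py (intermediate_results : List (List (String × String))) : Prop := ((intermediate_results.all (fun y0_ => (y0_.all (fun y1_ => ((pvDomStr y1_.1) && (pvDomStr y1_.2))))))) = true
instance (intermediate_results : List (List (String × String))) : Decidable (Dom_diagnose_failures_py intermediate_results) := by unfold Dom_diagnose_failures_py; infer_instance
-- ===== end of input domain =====

-- B restructures A's single fused three-flag accumulator loop into three independent `any` scans
-- plus a declarative flag/label table (objective: simpler decomposition; same O(n) cost).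

-- shared dict-lookup helpers: step.get(k) (assoc list, first match) and str(step.get(k) or "")
def pvGet (step : List (String × String)) (k : String) : Option String :=
  (step.find? (fun p => p.1 == k)).map Prod.snd

def pvGetS (step : List (String × String)) (k : String) : String :=
  (pvGet step k).getD ""

-- ===== PORT A =====
def diagnose_failures_py (intermediate_results : List (List (String × String))) : List String :=
  let st := intermediate_results.foldl
    (fun (s : Bool × Bool × Bool) step =>
      let op := pvGetS step "operation"
      let err := pvGetS step "error"
      let s1 := if err == "column_missing" || err == "empty_column" ||
                   err == "column_not_numeric" || err == "missing_column" then true else s.1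
      let s2 := if PySem.Str.startswith err "expected_" || err == "unknown_operation" then true else s.2.1
      let s3 := if op == "filter" &&
                   ((err == "filter_requires_value" || err == "filter_empty_value") ||
                    pvGet step "penalty_kind" == some "useless") then true else s.2.2
      (s1, s2, s3))
    (false, false, false)
  let reasons : List String := []
  let reasons := if st.1 then reasons ++ ["incorrect column"] else reasons
  let reasons := if st.2.1 then reasons ++ ["wrong operation"] else reasons
  let reasons := if st.2.2 then reasons ++ ["bad filtering"] else reasons
  if reasons = [] then ["no clear failure category detected"] else reasons

-- ===== PORT B =====
def pvIsIncorrectColumn (step : List (String × String)) : Bool :=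
  let err := pvGetS step "error"
  err == "column_missing" || err == "empty_column" ||
    err == "column_not_numeric" || err == "missing_column"

def pvIsWrongOperation (step : List (String × String)) : Bool :=
  let err := pvGetS step "error"
  PySem.Str.startswith err "expected_" || err == "unknown_operation"

def pvIsBadFiltering (step : List (String × String)) : Bool :=
  pvGetS step "operation" == "filter" &&
    ((pvGetS step "error" == "filter_requires_value" || pvGetS step "error" == "filter_empty_value") ||
     pvGet step "penalty_kind" == some "useless")

def diagnose_failures_py_alt (intermediate_results : List (List (String × String))) : List String :=
  let flags : List (Bool × String) :=
    [(intermediate_results.any pvIsIncorrectColumn, "incorrect column"),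
     (intermediate_results.any pvIsWrongOperation, "wrong operation"),
     (intermediate_results.any pvIsBadFiltering, "bad filtering")]
  let reasons := (flags.filter (·.1)).map (·.2)
  if reasons = [] then ["no clear failure category detected"] else reasons

-- ===== PRECONDITION & SPEC =====
def Spec_diagnose_failures_py (intermediate_results : List (List (String × String))) (out : List String) : Prop := out = diagnose_failures_py_alt intermediate_results
instance (intermediate_results : List (List (String × String))) (out : List String) : Decidable (Spec_diagnose_failures_py intermediate_results out) := by unfold Spec_diagnose_failures_py; infer_instance

-- ===== CLAIM (what is proved, stated in full; the proofs are below) =====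
def Claim_equal_diagnose_failures_py : Prop := ∀ (intermediate_results : List (List (String × String))), Dom_diagnose_failures_py intermediate_results → Spec_diagnose_failures_py intermediate_results (diagnose_failures_py intermediate_results)

-- ===== LEMMAS AND PROOFS =====

theorem pv_fold_eq (irs : List (List (String × String))) (s : Bool × Bool × Bool) :
    irs.foldl
      (fun (s : Bool × Bool × Bool) step =>
        let op := pvGetS step "operation"
        let err := pvGetS step "error"
        let s1 := if err == "column_missing" || err == "empty_column" ||
                     err == "column_not_numeric" || err == "missing_column" then true else s.1
        let s2 := if PySem.Str.startswith err "expected_" || err == "unknown_operation" then true else s.2.1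
        let s3 := if op == "filter" &&
                     ((err == "filter_requires_value" || err == "filter_empty_value") ||
                      pvGet step "penalty_kind" == some "useless") then true else s.2.2
        (s1, s2, s3)) s
    = (s.1 || irs.any pvIsIncorrectColumn,
       s.2.1 || irs.any pvIsWrongOperation,
       s.2.2 || irs.any pvIsBadFiltering) := by
  induction irs generalizing s with
  | nil => simp
  | cons x xs ih =>
    simp only [List.foldl_cons, List.any_cons, ih]
    unfold pvIsIncorrectColumn pvIsWrongOperation pvIsBadFiltering
    cases s with
    | mk a bc =>
      cases bc with
      | mk b c =>
        simp only []
        split_ifs with h1 h2 h3 <;>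
          simp_all <;> cases a <;> cases b <;> cases c <;> simp_all

-- ===== VERDICT (by name: the statement is the Claim_ definition above) =====
theorem diagnose_failures_py_spec : Claim_equal_diagnose_failures_py := by
  intro irs _
  show diagnose_failures_py irs = diagnose_failures_py_alt irs
  unfold diagnose_failures_py diagnose_failures_py_alt
  rw [pv_fold_eq]
  cases h1 : irs.any pvIsIncorrectColumn <;>
    cases h2 : irs.any pvIsWrongOperation <;>
      cases h3 : irs.any pvIsBadFiltering <;> simp
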